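-- pv_equiv track=rewrite | github.com/ThanyaWoramongkol/Problem-Solving-and-Computer-Programing_2023 | day 6/[Midterm 2022] Calculator.py | calc
-- ===== SOURCE A (Python) =====
-- def calc(jumnuan):
--     """-"""
--     count = 0
--     for i in range(1, jumnuan+1):
--         if jumnuan == 1:
--             count = 1
--             break
--         elif len(str(i)) == 1:
--             count += 2
--             continue
--         elif len(str(i)) >= 2 and i != jumnuan:
--             count += 1 + len(str(i))
--             continue
--         else:
--             count += 1 + len(str(i))
--     return count
-- ===== SOURCE B (Python) =====
-- def calc(jumnuan):
--     if jumnuan <= 0: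
--         return 0
--     if jumnuan == 1:
--         return 1
--     total = jumnuan
--     d = 1
--     low = 1
--     while low <= jumnuan:
--         high = min(jumnuan, low * 10 - 1)
--         total += d * (high - low + 1)
--         d += 1
--         low *= 10
--     return total
-- ===== Notes on version B (the rewrite author's own statement) =====
-- stated objective: faster
-- what changed: Replaces the per-number loop summing 1+len(str(i)) over the whole range with a closed-form sum over digit-length buckets (powers of ten), keeping the special cases for the smallest inputs
import Mathlib
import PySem

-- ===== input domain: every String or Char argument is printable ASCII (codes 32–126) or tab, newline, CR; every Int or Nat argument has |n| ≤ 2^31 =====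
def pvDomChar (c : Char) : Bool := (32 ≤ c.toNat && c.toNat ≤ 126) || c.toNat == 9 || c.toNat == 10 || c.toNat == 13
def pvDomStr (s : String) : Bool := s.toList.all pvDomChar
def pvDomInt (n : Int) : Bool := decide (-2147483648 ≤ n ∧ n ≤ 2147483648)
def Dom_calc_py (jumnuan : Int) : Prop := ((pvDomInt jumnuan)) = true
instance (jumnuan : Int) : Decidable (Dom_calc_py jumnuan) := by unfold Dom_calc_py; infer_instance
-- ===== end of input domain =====

-- B replaces A's per-number loop by a closed-form sum over digit-length buckets (objective: faster, O(log n) vs O(n log n)).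

-- ===== PORT A =====
-- the for-loop over range(1, jumnuan+1) with its break/continue structure
def calcLoopA (jumnuan : Int) : List Int → Int → Int
  | [], count => count
  | i :: rest, count =>
    if jumnuan = 1 then 1                                   -- count = 1; break
    else if PySem.Str.len (PySem.Int.toStr i) = 1 then
      calcLoopA jumnuan rest (count + 2)                    -- continue
    else if PySem.Str.len (PySem.Int.toStr i) ≥ 2 ∧ i ≠ jumnuan then
      calcLoopA jumnuan rest (count + (1 + PySem.Str.len (PySem.Int.toStr i)))  -- continue
    else
      calcLoopA jumnuan rest (count + (1 + PySem.Str.len (PySem.Int.toStr i)))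

def calc_py (jumnuan : Int) : Int :=
  calcLoopA jumnuan (PySem.List.pyRange 1 (jumnuan + 1) 1) 0

-- ===== PORT B =====
-- the while-loop of Source B: low runs over the powers of ten (kept as a Nat with a positivity
-- proof only for termination; the arithmetic is the same as Source B's)
def calcAltLoop (jumnuan : Int) (d : Int) (low : Nat) (hlow : 0 < low) (total : Int) : Int :=
  if (low : Int) ≤ jumnuan then
    calcAltLoop jumnuan (d + 1) (low * 10) (by omega)
      (total + d * (min jumnuan ((low : Int) * 10 - 1) - (low : Int) + 1))
  else total
termination_by (jumnuan + 1 - (low : Int)).toNat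
decreasing_by
  have : low + 9 ≤ low * 10 := by omega
  push_cast
  omega

def calc_py_alt (jumnuan : Int) : Int :=
  if jumnuan ≤ 0 then 0
  else if jumnuan = 1 then 1
  else calcAltLoop jumnuan 1 1 Nat.one_pos jumnuan

-- ===== PRECONDITION & SPEC =====
def Spec_calc_py (jumnuan : Int) (out : Int) : Prop := out = calc_py_alt jumnuan
instance (jumnuan : Int) (out : Int) : Decidable (Spec_calc_py jumnuan out) := by unfold Spec_calc_py; infer_instance

-- ===== CLAIM (what is proved, stated in full; the proofs are below) =====
def Claim_equal_calc_py : Prop := ∀ (jumnuan : Int), Dom_calc_py jumnuan → Spec_calc_py jumnuan (calc_py jumnuan)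

-- ===== LEMMAS AND PROOFS =====

-- len(str(i)) as an Int
def strL (i : Int) : Int := PySem.Str.len (PySem.Int.toStr i)

-- exact length of Nat.toDigitsCore
theorem toDigitsCore_len (f : ℕ) : ∀ (n : ℕ) (ds : List Char), n < f →
    (Nat.toDigitsCore 10 f n ds).length = Nat.log 10 n + 1 + ds.length := by
  induction f with
  | zero => intro n ds h; omega
  | succ f ih =>
    intro n ds h
    show (if n / 10 = 0 then _ :: ds else Nat.toDigitsCore 10 f (n / 10) (_ :: ds)).length = _
    by_cases h10 : n / 10 = 0
    · have hn : n < 10 := by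
        rcases (Nat.div_eq_zero_iff).mp h10 with h' | h' <;> omega
      have : Nat.log 10 n = 0 := Nat.log_eq_zero_iff.mpr (Or.inl hn)
      simp [h10, this]
      omega
    · have hge : 10 ≤ n := by
        by_contra hlt
        exact h10 (Nat.div_eq_of_lt (by omega))
      have hlt : n / 10 < f := by
        have := Nat.div_lt_self (by omega : 0 < n) (by omega : 1 < 10)
        omega
      have hrec := ih (n / 10) ((n % 10).digitChar :: ds) hlt
      have hlog : Nat.log 10 (n / 10) = Nat.log 10 n - 1 := Nat.log_div_base 10 n
      have hpos : 0 < Nat.log 10 n := Nat.log_pos (by omega) hge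
      simp only [h10, if_false]
      rw [hrec]
      simp only [List.length_cons]
      omega

-- len(str(i)) = log10(i) + 1 for i ≥ 1
theorem strL_eq_log (i : Int) (hi : 1 ≤ i) :
    strL i = (Nat.log 10 i.toNat : Int) + 1 := by
  have hneg : ¬ i < 0 := by omega
  simp only [strL, PySem.Str.len_eq, PySem.Int.toList_toStr, PySem.Int.toChars, hneg, if_false]
  have := toDigitsCore_len (i.toNat + 1) i.toNat [] (by omega)
  simp only [Nat.toDigits, this]
  simp

-- numbers in the bucket [10^k, 10^(k+1)) have digit length k+1
theorem strL_bucket (k : ℕ) (i : Int) (h1 : (10 : Int) ^ k ≤ i)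
    (h2 : i < (10 : Int) ^ (k + 1)) : strL i = (k : Int) + 1 := by
  have hA : (((10 : ℕ) ^ k : ℕ) : Int) = (10 : Int) ^ k := by push_cast; ring
  have hB : (((10 : ℕ) ^ (k + 1) : ℕ) : Int) = (10 : Int) ^ (k + 1) := by push_cast; ring
  have hp : (1 : ℕ) ≤ 10 ^ k := Nat.one_le_pow _ _ (by omega)
  have hi1 : 1 ≤ i := by omega
  have hlo : 10 ^ k ≤ i.toNat := by omega
  have hhi : i.toNat < 10 ^ (k + 1) := by omega
  rw [strL_eq_log i hi1, Nat.log_eq_of_pow_le_of_lt_pow hlo hhi]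

-- A's loop just sums 1 + len(str(i)) when jumnuan ≠ 1
theorem calcLoopA_sum (jumnuan : Int) (hne : jumnuan ≠ 1) :
    ∀ (l : List Int) (count : Int),
      calcLoopA jumnuan l count = count + (l.map (fun i => 1 + strL i)).sum := by
  intro l
  induction l with
  | nil => intro count; simp [calcLoopA]
  | cons i rest ih =>
    intro count
    simp only [calcLoopA, if_neg hne, List.map_cons, List.sum_cons]
    by_cases h1 : PySem.Str.len (PySem.Int.toStr i) = 1
    · rw [if_pos h1, ih]
      have : strL i = 1 := h1
      rw [this]; ring
    · rw [if_neg h1]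
      split <;> (rw [ih]; unfold strL; ring)

-- both positivity proofs being irrelevant, calcAltLoop only depends on low's value
theorem calcAltLoop_congr (j d : Int) {l1 l2 : Nat} (h : l1 = l2) (p1 : 0 < l1) (p2 : 0 < l2)
    (t : Int) : calcAltLoop j d l1 p1 t = calcAltLoop j d l2 p2 t := by subst h; rfl

-- B's loop invariant: starting at low = 10^k with d = k+1 it adds Σ strL over [10^k, jumnuan]
theorem calcAltLoop_inv (jumnuan : Int) : ∀ (k : ℕ) (total : Int) (h : 0 < 10 ^ k),
    calcAltLoop jumnuan ((k : Int) + 1) (10 ^ k) h total =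
      total + ((PySem.List.pyRange ((10 : Int) ^ k) (jumnuan + 1) 1).map strL).sum := by
  intro k
  induction hM : (jumnuan + 1 - (10 : Int) ^ k).toNat using Nat.strong_induction_on generalizing k with
  | _ M ih =>
  intro total h
  have hA : (((10 : ℕ) ^ k : ℕ) : Int) = (10 : Int) ^ k := by push_cast; ring
  have hA' : (((10 : ℕ) ^ k * 10 : ℕ) : Int) = (10 : Int) ^ (k + 1) := by push_cast; ring
  have hS : (10 : Int) ^ (k + 1) = (10 : Int) ^ k * 10 := by ring
  have hpow : (1 : Int) ≤ (10 : Int) ^ k := one_le_pow₀ (by norm_num)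
  rw [calcAltLoop]
  simp only [hA]
  by_cases hle : (10 : Int) ^ k ≤ jumnuan
  · rw [if_pos hle]
    have hdec : (jumnuan + 1 - (10 : Int) ^ (k + 1)).toNat < M := by
      rw [← hM, hS]; omega
    have hrec := ih _ hdec (k + 1) rfl
      (total + ((k : Int) + 1) * (min jumnuan ((10 : Int) ^ k * 10 - 1) - (10 : Int) ^ k + 1))
      (Nat.one_le_pow _ _ (by omega))
    have hcast : (((k + 1 : ℕ)) : Int) + 1 = ((k : Int) + 1) + 1 := by push_cast; ring
    have harg : (10 : ℕ) ^ k * 10 = 10 ^ (k + 1) := by ring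
    rw [hcast] at hrec
    rw [calcAltLoop_congr jumnuan ((k : Int) + 1 + 1) harg (by omega) (Nat.one_le_pow _ _ (by omega)), hrec]
    by_cases hB : (10 : Int) ^ (k + 1) ≤ jumnuan + 1
    · -- full bucket [10^k, 10^(k+1))
      rw [PySem.List.pyRange_one_append ((10 : Int) ^ k) ((10 : Int) ^ (k + 1)) (jumnuan + 1)
          (by rw [hS]; omega) hB]
      rw [List.map_append, List.sum_append]
      have hbucket : ((PySem.List.pyRange ((10 : Int) ^ k) ((10 : Int) ^ (k + 1)) 1).map strL).sum
          = ((k : Int) + 1) * ((10 : Int) ^ (k + 1) - (10 : Int) ^ k) := by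
        have hcongr : (PySem.List.pyRange ((10 : Int) ^ k) ((10 : Int) ^ (k + 1)) 1).map strL
            = (PySem.List.pyRange ((10 : Int) ^ k) ((10 : Int) ^ (k + 1)) 1).map (fun _ => (k : Int) + 1) := by
          apply List.map_congr_left
          intro x hx
          rw [PySem.List.mem_pyRange_one] at hx
          exact strL_bucket k x hx.1 hx.2
        rw [hcongr, PySem.List.sum_map_const_int, PySem.List.length_pyRange_one]
        have : (((10 : Int) ^ (k + 1) - (10 : Int) ^ k).toNat : Int)
            = (10 : Int) ^ (k + 1) - (10 : Int) ^ k := by rw [hS]; omega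
        rw [this]; ring
      have hmin : min jumnuan ((10 : Int) ^ k * 10 - 1) = (10 : Int) ^ (k + 1) - 1 := by
        rw [hS] at hB; omega
      rw [hbucket, hmin, hS]; ring
    · -- last, partial bucket [10^k, jumnuan]
      have hnil : PySem.List.pyRange ((10 : Int) ^ (k + 1)) (jumnuan + 1) 1 = [] :=
        PySem.List.pyRange_one_eq_nil (by omega)
      have hcongr : (PySem.List.pyRange ((10 : Int) ^ k) (jumnuan + 1) 1).map strL
          = (PySem.List.pyRange ((10 : Int) ^ k) (jumnuan + 1) 1).map (fun _ => (k : Int) + 1) := by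
        apply List.map_congr_left
        intro x hx
        rw [PySem.List.mem_pyRange_one] at hx
        exact strL_bucket k x hx.1 (by omega)
      rw [hnil, hcongr, PySem.List.sum_map_const_int, PySem.List.length_pyRange_one]
      have hmin : min jumnuan ((10 : Int) ^ k * 10 - 1) = jumnuan := by
        rw [hS] at hB; omega
      have hcast2 : ((jumnuan + 1 - (10 : Int) ^ k).toNat : Int) = jumnuan + 1 - (10 : Int) ^ k := by
        omega
      rw [hmin, hcast2]
      simp; ring
  · rw [if_neg hle]
    have hnil : PySem.List.pyRange ((10 : Int) ^ k) (jumnuan + 1) 1 = [] :=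
      PySem.List.pyRange_one_eq_nil (by omega)
    rw [hnil]; simp

-- Σ (1 + strL i) over a list = length + Σ strL i
theorem sum_one_add (l : List Int) :
    (l.map (fun i => 1 + strL i)).sum = (l.length : Int) + (l.map strL).sum := by
  induction l with
  | nil => simp
  | cons a l ih => simp [ih]; ring

-- ===== VERDICT (by name: the statement is the Claim_ definition above) =====
theorem calc_py_spec : Claim_equal_calc_py := by
  intro jumnuan _
  unfold Spec_calc_py calc_py calc_py_alt
  by_cases h0 : jumnuan ≤ 0
  · have : PySem.List.pyRange 1 (jumnuan + 1) 1 = [] :=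
      PySem.List.pyRange_one_eq_nil (by omega)
    rw [this, if_pos h0]
    simp [calcLoopA]
  · rw [if_neg h0]
    by_cases h1 : jumnuan = 1
    · subst h1
      rw [if_pos rfl]
      rw [PySem.List.pyRange_one_cons (by norm_num)]
      simp [calcLoopA]
    · rw [if_neg h1]
      rw [calcLoopA_sum jumnuan h1, sum_one_add, PySem.List.length_pyRange_one]
      have hinv := calcAltLoop_inv jumnuan 0 jumnuan (by norm_num)
      norm_num at hinv
      have h10 : ((10:ℕ) ^ 0 : Int) = 1 := by norm_num
      rw [hinv]
      have : ((jumnuan + 1 - 1).toNat : Int) = jumnuan := by omega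
      rw [this]
      ring
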